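-- pv_equiv track=rewrite | github.com/Shady152/ENPH213 | Lab2.py | fillc
-- ===== SOURCE A (Python) =====
-- def fillc(n):
--     c = list(range(0, n))
--     c[0] = 1
--     for i in range(1, n, 2):
--         c[i] = 4
--     for i in range(2, n-1, 2):
--         c[i] = 2
--     c[n-1] = 1
--     return c
-- ===== SOURCE B (Python) =====
-- def fillc(n):
--     return ([1] + [4, 2] * (n // 2))[:n - 1] + [1]
-- ===== Notes on version B (the rewrite author's own statement) =====
-- stated objective: simpler
-- what changed: A allocates range(0,n) and mutates it in three sequential overwrite passes plus two endpoint writes; B performs no per-index writes at all: it builds the list by concatenation as [1] + the repeated period [4,2] truncated by a slice to n-1 entries, plus the final [1].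
import Mathlib
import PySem

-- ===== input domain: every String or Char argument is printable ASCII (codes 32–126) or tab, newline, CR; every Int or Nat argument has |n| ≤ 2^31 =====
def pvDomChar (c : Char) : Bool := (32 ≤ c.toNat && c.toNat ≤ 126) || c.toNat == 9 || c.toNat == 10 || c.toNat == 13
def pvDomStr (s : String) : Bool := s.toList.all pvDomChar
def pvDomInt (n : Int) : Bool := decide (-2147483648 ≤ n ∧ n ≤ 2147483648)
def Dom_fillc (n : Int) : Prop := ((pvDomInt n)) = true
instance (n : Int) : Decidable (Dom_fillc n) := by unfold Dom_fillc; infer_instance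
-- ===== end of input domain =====

-- B builds the coefficient list by concatenation ([1] + repeated period [4,2] sliced to n-1
-- entries + [1]) instead of A's three in-place overwrite passes (objective: simpler).

-- ===== PORT A =====
def fillc (n : Int) : List Int :=
  let c := PySem.List.pyRange 0 n 1
  let c := PySem.List.pySetD c 0 1
  let c := (PySem.List.pyRange 1 n 2).foldl (fun c i => PySem.List.pySetD c i 4) c
  let c := (PySem.List.pyRange 2 (n - 1) 2).foldl (fun c i => PySem.List.pySetD c i 2) c
  PySem.List.pySetD c (n - 1) 1

-- ===== PORT B =====
def fillc_alt (n : Int) : List Int :=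
  PySem.List.slice ((1 : Int) :: PySem.List.pyRepeat ([4, 2] : List Int) (PySem.Int.floordiv n 2))
    none (some (n - 1)) ++ [1]

-- ===== PRECONDITION & SPEC =====
-- Pre_ excludes n ≤ 0, where the empty list makes Python's c[0] = 1 raise IndexError in A.
def Pre_fillc (n : Int) : Prop := 1 ≤ n
instance (n : Int) : Decidable (Pre_fillc n) := by unfold Pre_fillc; infer_instance
def pvWitness_fillc : Int := 5

def Spec_fillc (n : Int) (out : List Int) : Prop := out = fillc_alt n
instance (n : Int) (out : List Int) : Decidable (Spec_fillc n out) := by unfold Spec_fillc; infer_instance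

-- ===== CLAIM (what is proved, stated in full; the proofs are below) =====
def Claim_equal_fillc : Prop := ∀ (n : Int), Dom_fillc n → Pre_fillc n → Spec_fillc n (fillc n)

-- ===== LEMMAS AND PROOFS =====

theorem foldl_pySetD_length (l : List Int) (v : Int) (c : List Int) :
    (l.foldl (fun c i => PySem.List.pySetD c i v) c).length = c.length := by
  induction l generalizing c with
  | nil => rfl
  | cons i l ih => simp [List.foldl_cons, ih, PySem.List.length_pySetD]

theorem foldl_pySetD_getElem (l : List Int) (v : Int) (c : List Int) (j : Nat)
    (hj : j < c.length) (hl : ∀ i ∈ l, 0 ≤ i) :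
    (l.foldl (fun c i => PySem.List.pySetD c i v) c)[j]'(by
        rw [foldl_pySetD_length]; exact hj)
      = if (↑j : Int) ∈ l then v else getElem c j hj := by
  induction l generalizing c with
  | nil => simp
  | cons i l ih =>
    have hi0 : 0 ≤ i := hl i (by simp)
    have hrw : PySem.List.pySetD c i v = c.set i.toNat v := by
      conv_lhs => rw [← Int.toNat_of_nonneg hi0]
      exact PySem.List.pySetD_natCast c i.toNat v
    simp only [List.foldl_cons, hrw]
    rw [ih (c.set i.toNat v) (by simpa using hj) (fun i h => hl i (List.mem_cons_of_mem _ h))]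
    by_cases hmem : (↑j : Int) ∈ l
    · simp [hmem]
    · by_cases hji : (↑j : Int) = i
      · have h1 : i.toNat = j := by omega
        simp [hji, h1]
      · have h2 : i.toNat ≠ j := by omega
        simp [hmem, hji, h2]

theorem rep_length (k : Nat) :
    (PySem.List.pyRepeat ([4, 2] : List Int) ↑k).length = 2 * k := by
  simp [PySem.List.pyRepeat, List.length_flatten, Nat.mul_comm]

theorem rep_getElem? (k j : Nat) (h : j < 2 * k) :
    (PySem.List.pyRepeat ([4, 2] : List Int) ↑k)[j]? =
      some (if j % 2 = 0 then 4 else 2) := by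
  simp only [PySem.List.pyRepeat, Int.toNat_natCast]
  induction k generalizing j with
  | zero => omega
  | succ k ih =>
    rw [List.replicate_succ, List.flatten_cons]
    match j with
    | 0 => simp
    | 1 => simp
    | (j + 2) =>
      have h' : j < 2 * k := by omega
      have := ih j h'
      have hmod : (j + 2) % 2 = j % 2 := by omega
      simpa [hmod] using this

theorem rep_getElem (k j : Nat) (h : j < (PySem.List.pyRepeat ([4, 2] : List Int) ↑k).length) :
    (PySem.List.pyRepeat ([4, 2] : List Int) ↑k)[j] = if j % 2 = 0 then 4 else 2 := by
  have h2 : j < 2 * k := by rwa [rep_length] at h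
  have := rep_getElem? k j h2
  rw [List.getElem?_eq_getElem h] at this
  exact Option.some.inj this

theorem fillc_spec : Claim_equal_fillc := by
  intro n _ hpre
  have hp : (1 : Int) ≤ n := hpre
  unfold Spec_fillc
  obtain ⟨m, rfl⟩ : ∃ m : Nat, n = ↑m := ⟨n.toNat, (Int.toNat_of_nonneg (by omega)).symm⟩
  have hm : 1 ≤ m := by exact_mod_cast hp
  have hz : (0 : Int) = ((0 : Nat) : Int) := rfl
  have hm1 : ((m : Int) - 1) = ((m - 1 : Nat) : Int) := by omega
  have hfd : PySem.Int.floordiv (↑m) 2 = ((m / 2 : Nat) : Int) := by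
    exact_mod_cast PySem.Int.floordiv_natCast m 2
  have hB : fillc_alt ↑m =
      (((1 : Int) :: PySem.List.pyRepeat ([4, 2] : List Int) ↑(m / 2)).take (m - 1)) ++ [1] := by
    rw [fillc_alt, hfd, hm1, PySem.List.slice_to_natCast]
  have hTakeLen :
      (((1 : Int) :: PySem.List.pyRepeat ([4, 2] : List Int) ↑(m / 2)).take (m - 1)).length
        = m - 1 := by
    rw [List.length_take, List.length_cons, rep_length]; omega
  simp only [fillc, fillc_alt, hz, hm1, PySem.List.pySetD_natCast] at *
  have hlenR : (PySem.List.pyRange 0 (↑m) 1).length = m := by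
    rw [PySem.List.length_pyRange_one]; omega
  rw [hB]
  apply List.ext_getElem
  · rw [List.length_append, hTakeLen]
    simp [foldl_pySetD_length, hlenR]
    omega
  · intro j h1 h2
    have hj : j < m := by simpa [foldl_pySetD_length, hlenR] using h1
    rw [List.getElem_set]
    by_cases hlast : m - 1 = j
    · have hge : (((1 : Int) :: PySem.List.pyRepeat ([4, 2] : List Int) ↑(m / 2)).take
          (m - 1)).length ≤ j := by rw [hTakeLen]; omega
      rw [List.getElem_append_right hge]
      have h0 : j - (((1 : Int) :: PySem.List.pyRepeat ([4, 2] : List Int) ↑(m / 2)).take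
          (m - 1)).length = 0 := by rw [hTakeLen]; omega
      simp [h0, hlast]
    · have hjlt : j < (((1 : Int) :: PySem.List.pyRepeat ([4, 2] : List Int) ↑(m / 2)).take
          (m - 1)).length := by rw [hTakeLen]; omega
      rw [List.getElem_append_left hjlt, List.getElem_take]
      simp only [hlast, if_false]
      rw [foldl_pySetD_getElem (PySem.List.pyRange 2 (↑(m - 1)) 2) 2 _ j
          (by rw [foldl_pySetD_length]; simpa [hlenR] using hj)
          (fun i hi => by
            have := (PySem.List.mem_pyRange_iff_of_pos (s := 2) (by norm_num) i).1 hi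
            omega)]
      rw [foldl_pySetD_getElem (PySem.List.pyRange 1 (↑m) 2) 4 _ j
          (by simpa [hlenR] using hj)
          (fun i hi => by
            have := (PySem.List.mem_pyRange_iff_of_pos (s := 2) (by norm_num) i).1 hi
            omega)]
      rw [List.getElem_set]
      have hmem2 : ((↑j : Int) ∈ PySem.List.pyRange 2 (↑(m - 1)) 2) ↔
          ((2 : Int) ≤ ↑j ∧ (j : Int) < ↑(m - 1) ∧ (2 : Int) ∣ ↑j - 2) :=
        PySem.List.mem_pyRange_iff_of_pos (by norm_num) _
      have hmem4 : ((↑j : Int) ∈ PySem.List.pyRange 1 (↑m) 2) ↔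
          ((1 : Int) ≤ ↑j ∧ (j : Int) < ↑m ∧ (2 : Int) ∣ ↑j - 1) :=
        PySem.List.mem_pyRange_iff_of_pos (by norm_num) _
    -- B side: cons then the repeated period
      match j, hj with
      | 0, _ =>
        simp only [List.getElem_cons_zero, hmem2, hmem4, PySem.List.getElem_pyRange_one]
        split_ifs <;> omega
      | (j + 1), hj =>
        rw [List.getElem_cons_succ, rep_getElem (m / 2) j (by rw [rep_length]; omega)]
        simp only [hmem2, hmem4, PySem.List.getElem_pyRange_one]
        split_ifs <;> omega
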